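-- pv_equiv track=rewrite | github.com/hisham-pk-git/CPSC-535-Advanced-Algorithms---Project-1 | island_problem.py | largest_land_mass
-- ===== SOURCE A (Python) =====
-- def largest_land_mass(area):
--     # Helper function to perform Depth First Search (DFS) to calculate the size of a land mass
--     def depth_first_search(row, col, visited_cells):
--         # Base condition to stop DFS if out of bounds or at water (1) or already visited
--         if row < 0 or row >= len(area) or col < 0 or col >= len(area[0]) or (row, col) in visited_cells or area[row][col] == 1:
--             return 0
--         visited_cells.add((row, col))  # Mark the current cell as visited
--         land_size = 1
--
--         # Explore all four possible directions: up, down, left, right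
--         land_size += depth_first_search(row - 1, col, visited_cells)  # Up
--         land_size += depth_first_search(row + 1, col, visited_cells)  # Down
--         land_size += depth_first_search(row, col - 1, visited_cells)  # Left
--         land_size += depth_first_search(row, col + 1, visited_cells)  # Right
--
--         return land_size
--
--     # Variable to keep track of the maximum land mass found
--     largest_mass = 0
--     num_rows, num_cols = len(area), len(area[0])
--
--     # Iterate over each cell in the matrix
--     for row in range(num_rows):
--         for col in range(num_cols):
--             # If the current cell is "1", try flipping it to "0"
--             if area[row][col] == 1:
--                 # Flip the "1" to "0"
--                 area[row][col] = 0
--                 visited_cells = set()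
--
--                 # Calculate the size of the new land mass formed
--                 current_mass = 0
--                 for r in range(num_rows):
--                     for c in range(num_cols):
--                         # If the cell is "0" and not visited, calculate the size of the land mass
--                         if area[r][c] == 0 and (r, c) not in visited_cells:
--                             current_mass = max(current_mass, depth_first_search(r, c, visited_cells))
--
--                 # Update the maximum land mass size if we found a bigger one
--                 largest_mass = max(largest_mass, current_mass)
--
--                 # Restore the cell back to "1" for further calculations
--                 area[row][col] = 1
--
--     return largest_mass
-- ===== SOURCE B (Python) =====
-- def largest_land_mass(area):
--     num_rows, num_cols = len(area), len(area[0])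
--     best = 0
--     for fr in range(num_rows):
--         for fc in range(num_cols):
--             if area[fr][fc] == 1:
--                 # treat (fr, fc) as flipped to land without mutating the grid
--                 def val(r, c):
--                     return 0 if (r, c) == (fr, fc) else area[r][c]
--                 visited = set()
--                 current = 0
--                 for r in range(num_rows):
--                     for c in range(num_cols):
--                         if val(r, c) == 0 and (r, c) not in visited:
--                             # iterative flood fill with an explicit stack
--                             size = 0
--                             stack = [(r, c)]
--                             while stack:
--                                 rr, cc = stack.pop()
--                                 if 0 <= rr < num_rows and 0 <= cc < num_cols and (rr, cc) not in visited and val(rr, cc) != 1: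
--                                     visited.add((rr, cc))
--                                     size += 1
--                                     stack.append((rr, cc + 1))
--                                     stack.append((rr, cc - 1))
--                                     stack.append((rr + 1, cc))
--                                     stack.append((rr - 1, cc))
--                             current = max(current, size)
--                 best = max(best, current)
--     return best
-- ===== Notes on version B (the rewrite author's own statement) =====
-- stated objective: alternative
-- what changed: Replaces the recursive DFS (which mutates the grid to flip a cell and can hit Python's recursion limit) by an iterative explicit-stack flood fill over an unmutated grid viewed through a flip-aware accessor.
import Mathlib
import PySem

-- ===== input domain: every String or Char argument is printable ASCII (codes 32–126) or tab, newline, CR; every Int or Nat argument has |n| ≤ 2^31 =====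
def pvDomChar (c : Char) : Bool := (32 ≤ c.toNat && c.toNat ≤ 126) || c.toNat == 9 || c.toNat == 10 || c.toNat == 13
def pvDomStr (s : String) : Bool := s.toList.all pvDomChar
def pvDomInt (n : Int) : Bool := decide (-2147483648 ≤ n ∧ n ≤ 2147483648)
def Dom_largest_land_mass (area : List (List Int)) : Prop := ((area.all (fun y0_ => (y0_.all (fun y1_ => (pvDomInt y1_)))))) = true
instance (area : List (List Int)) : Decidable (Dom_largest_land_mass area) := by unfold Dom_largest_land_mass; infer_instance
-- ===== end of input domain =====

-- B replaces A's recursive, grid-mutating DFS by an iterative explicit-stack flood fill over the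
-- unmutated grid seen through a flip-aware accessor (objective: alternative; A's transient in-place
-- flip-and-restore mutation is not reproduced by B, which never mutates its argument).

-- ===== PORT A =====
-- area[r] (only used where Python has already ensured 0 <= r < len(area), or under Pre_)
def pvRow (area : List (List Int)) (r : Int) : List Int := PySem.List.pyGetD area r []
-- area[r][c]
def pvCell (area : List (List Int)) (r c : Int) : Int := PySem.List.pyGetD (pvRow area r) c 0
-- area[r][c] = v  (the in-place mutation, as a functional update)
def pvSetCell (area : List (List Int)) (r c v : Int) : List (List Int) :=
  PySem.List.pySetD area r (PySem.List.pySetD (pvRow area r) c v)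

-- depth_first_search(row, col, visited_cells): returns (land_size, visited); fuel only makes the
-- recursion total — rows*cols+1 is always enough (the call depth is bounded by the visited cells).
def pvDfsA (area : List (List Int)) : Nat → Int → Int → PySem.Set (Int × Int) → Int × PySem.Set (Int × Int)
  | 0, _, _, V => (0, V)
  | Nat.succ fuel, row, col, V =>
    if row < 0 ∨ (area.length : Int) ≤ row ∨ col < 0 ∨ ((pvRow area 0).length : Int) ≤ col ∨
        PySem.Set.contains V (row, col) ∨ pvCell area row col = 1 then (0, V)
    else
      let V0 := PySem.Set.add V (row, col)
      let p1 := pvDfsA area fuel (row - 1) col V0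
      let p2 := pvDfsA area fuel (row + 1) col p1.2
      let p3 := pvDfsA area fuel row (col - 1) p2.2
      let p4 := pvDfsA area fuel row (col + 1) p3.2
      (1 + p1.1 + p2.1 + p3.1 + p4.1, p4.2)

def largest_land_mass (area : List (List Int)) : Int :=
  let numRows : Int := area.length
  let numCols : Int := (pvRow area 0).length
  (PySem.List.pyRange 0 numRows 1).foldl (fun best row =>
    (PySem.List.pyRange 0 numCols 1).foldl (fun best col =>
      if pvCell area row col = 1 then
        let area2 := pvSetCell area row col 0
        let st := (PySem.List.pyRange 0 numRows 1).foldl (fun st r =>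
          (PySem.List.pyRange 0 numCols 1).foldl (fun (st : Int × PySem.Set (Int × Int)) c =>
            if pvCell area2 r c = 0 ∧ ¬ PySem.Set.contains st.2 (r, c) then
              let p := pvDfsA area2 (numRows.toNat * numCols.toNat + 1) r c st.2
              (max st.1 p.1, p.2)
            else st) st) ((0 : Int), (PySem.Set.empty : PySem.Set (Int × Int)))
        max best st.1
      else best) best) 0

-- ===== PORT B =====
-- val(r, c): the grid with (fr, fc) flipped to land, without mutating it
def pvVal (area : List (List Int)) (fr fc r c : Int) : Int :=
  if r = fr ∧ c = fc then 0 else pvCell area r c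

-- the `while stack:` loop of Source B; the Lean list's head is the top of the Python stack, so the four
-- pushes right,left,down,up become the cons chain up,down,left,right; fuel only makes the loop
-- total — 4*rows*cols+2 iterations always suffice (each mark pushes 4, marks ≤ rows*cols).
def pvFloodB (area : List (List Int)) (fr fc : Int) :
    Nat → List (Int × Int) → Int → PySem.Set (Int × Int) → Int × PySem.Set (Int × Int)
  | _, [], size, V => (size, V)
  | 0, _, size, V => (size, V)
  | Nat.succ fuel, (rr, cc) :: rest, size, V =>
    if 0 ≤ rr ∧ rr < (area.length : Int) ∧ 0 ≤ cc ∧ cc < ((pvRow area 0).length : Int) ∧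
        ¬ PySem.Set.contains V (rr, cc) ∧ pvVal area fr fc rr cc ≠ 1 then
      pvFloodB area fr fc fuel
        ((rr - 1, cc) :: (rr + 1, cc) :: (rr, cc - 1) :: (rr, cc + 1) :: rest)
        (size + 1) (PySem.Set.add V (rr, cc))
    else pvFloodB area fr fc fuel rest size V

def largest_land_mass_alt (area : List (List Int)) : Int :=
  let numRows : Int := area.length
  let numCols : Int := (pvRow area 0).length
  (PySem.List.pyRange 0 numRows 1).foldl (fun best fr =>
    (PySem.List.pyRange 0 numCols 1).foldl (fun best fc =>
      if pvCell area fr fc = 1 then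
        let st := (PySem.List.pyRange 0 numRows 1).foldl (fun st r =>
          (PySem.List.pyRange 0 numCols 1).foldl (fun (st : Int × PySem.Set (Int × Int)) c =>
            if pvVal area fr fc r c = 0 ∧ ¬ PySem.Set.contains st.2 (r, c) then
              let q := pvFloodB area fr fc (4 * (numRows.toNat * numCols.toNat) + 2) [(r, c)] 0 st.2
              (max st.1 q.1, q.2)
            else st) st) ((0 : Int), (PySem.Set.empty : PySem.Set (Int × Int)))
        max best st.1
      else best) best) 0

-- ===== PRECONDITION & SPEC =====
-- Pre_ excludes exactly the inputs on which A raises IndexError: the empty grid (len(area[0]))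
-- and grids where some row is shorter than row 0 (every such cell is read by the scan loops).
def Pre_largest_land_mass (area : List (List Int)) : Prop :=
  area ≠ [] ∧ ∀ row ∈ area, (pvRow area 0).length ≤ row.length
instance (area : List (List Int)) : Decidable (Pre_largest_land_mass area) := by
  unfold Pre_largest_land_mass; infer_instance
def pvWitness_largest_land_mass : List (List Int) := [[1, 0], [0, 1]]

def Spec_largest_land_mass (area : List (List Int)) (out : Int) : Prop := out = largest_land_mass_alt area
instance (area : List (List Int)) (out : Int) : Decidable (Spec_largest_land_mass area out) := by unfold Spec_largest_land_mass; infer_instance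

-- ===== CLAIM (what is proved, stated in full; the proofs are below) =====
def Claim_equal_largest_land_mass : Prop := ∀ (area : List (List Int)), Dom_largest_land_mass area → Pre_largest_land_mass area → Spec_largest_land_mass area (largest_land_mass area)

-- ===== LEMMAS AND PROOFS =====

-- the in-bounds cells, and the count of those not yet visited (the termination measure)
def pvAllCells (rows cols : Int) : List (Int × Int) :=
  ((List.range rows.toNat).map (fun (n : Nat) => (n : Int))).product
    ((List.range cols.toNat).map (fun (n : Nat) => (n : Int)))

def pvUnvis (rows cols : Int) (V : PySem.Set (Int × Int)) : Nat :=
  ((pvAllCells rows cols).filter (fun x => ¬ PySem.Set.contains V x)).length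

theorem mem_pvAllCells (rows cols : Int) (a b : Int) :
    (a, b) ∈ pvAllCells rows cols ↔ 0 ≤ a ∧ a < rows ∧ 0 ≤ b ∧ b < cols := by
  unfold pvAllCells
  rw [List.pair_mem_product]
  simp only [List.mem_map, List.mem_range]
  constructor
  · rintro ⟨⟨r, hr, hra⟩, ⟨c, hc, hcb⟩⟩
    omega
  · rintro ⟨h1, h2, h3, h4⟩
    exact ⟨⟨a.toNat, by omega, by omega⟩, ⟨b.toNat, by omega, by omega⟩⟩

theorem length_pvAllCells (rows cols : Int) :
    (pvAllCells rows cols).length = rows.toNat * cols.toNat := by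
  simp [pvAllCells, List.product, List.length_flatMap, Function.comp_def, List.map_const',
    List.sum_replicate, smul_eq_mul]

theorem pvUnvis_le (rows cols : Int) (V : PySem.Set (Int × Int)) :
    pvUnvis rows cols V ≤ rows.toNat * cols.toNat := by
  calc pvUnvis rows cols V ≤ (pvAllCells rows cols).length := List.length_filter_le _ _
    _ = _ := length_pvAllCells rows cols

theorem contains_mono (V : PySem.Set (Int × Int)) (x y : Int × Int)
    (h : PySem.Set.contains V y) : PySem.Set.contains (PySem.Set.add V x) y := by
  simp only [PySem.Set.contains, List.contains_iff_mem] at *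
  exact (PySem.Set.mem_add V x y).mpr (Or.inl h)

theorem filter_unvis_sublist (rows cols : Int) (V : PySem.Set (Int × Int)) (x : Int × Int) :
    ((pvAllCells rows cols).filter (fun y => ¬ PySem.Set.contains (PySem.Set.add V x) y)).Sublist
      ((pvAllCells rows cols).filter (fun y => ¬ PySem.Set.contains V y)) := by
  apply List.monotone_filter_right
  intro y hy
  simp only [decide_eq_true_eq] at *
  exact fun hc => hy (contains_mono V x y hc)

theorem pvUnvis_add_le (rows cols : Int) (V : PySem.Set (Int × Int)) (x : Int × Int) :
    pvUnvis rows cols (PySem.Set.add V x) ≤ pvUnvis rows cols V :=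
  (filter_unvis_sublist rows cols V x).length_le

theorem pvUnvis_add_lt (rows cols : Int) (V : PySem.Set (Int × Int)) (r c : Int)
    (h1 : 0 ≤ r) (h2 : r < rows) (h3 : 0 ≤ c) (h4 : c < cols)
    (h5 : ¬ PySem.Set.contains V (r, c)) :
    pvUnvis rows cols (PySem.Set.add V (r, c)) < pvUnvis rows cols V := by
  have hsub := filter_unvis_sublist rows cols V (r, c)
  have hmemq : (r, c) ∈ (pvAllCells rows cols).filter (fun y => ¬ PySem.Set.contains V y) := by
    refine List.mem_filter.mpr ⟨(mem_pvAllCells rows cols r c).mpr ⟨h1, h2, h3, h4⟩, by simpa using h5⟩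
  have hmemp : (r, c) ∉ (pvAllCells rows cols).filter
      (fun y => ¬ PySem.Set.contains (PySem.Set.add V (r, c)) y) := by
    intro hmem
    have := (List.mem_filter.mp hmem).2
    simp only [decide_eq_true_eq, PySem.Set.contains, List.contains_iff_mem] at this
    exact this ((PySem.Set.mem_add V (r, c) (r, c)).mpr (Or.inr rfl))
  have hne : ((pvAllCells rows cols).filter (fun y => ¬ PySem.Set.contains (PySem.Set.add V (r, c)) y)) ≠
      ((pvAllCells rows cols).filter (fun y => ¬ PySem.Set.contains V y)) := by
    intro h; rw [h] at hmemp; exact hmemp hmemq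
  exact Nat.lt_of_le_of_ne hsub.length_le (fun h => hne (hsub.eq_of_length h))

-- the common worklist semantics both traversals compute
def pvFlood (rows cols : Int) (g : Int → Int → Int) :
    List (Int × Int) → PySem.Set (Int × Int) → Int × PySem.Set (Int × Int)
  | [], V => (0, V)
  | (r, c) :: rest, V =>
    if r < 0 ∨ rows ≤ r ∨ c < 0 ∨ cols ≤ c ∨ PySem.Set.contains V (r, c) ∨ g r c = 1 then
      pvFlood rows cols g rest V
    else
      ((pvFlood rows cols g ((r - 1, c) :: (r + 1, c) :: (r, c - 1) :: (r, c + 1) :: rest)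
          (PySem.Set.add V (r, c))).1 + 1,
        (pvFlood rows cols g ((r - 1, c) :: (r + 1, c) :: (r, c - 1) :: (r, c + 1) :: rest)
          (PySem.Set.add V (r, c))).2)
termination_by s V => 5 * pvUnvis rows cols V + s.length
decreasing_by
  all_goals first
  | (simp only [List.length_cons]; omega)
  | (rename_i h
     push_neg at h
     obtain ⟨h1, h2, h3, h4, h5, _⟩ := h
     have := pvUnvis_add_lt rows cols V r c (by omega) (by omega) (by omega) (by omega) (by simpa using h5)
     simp only [List.length_cons]
     omega)

theorem pvFlood_nil (rows cols : Int) (g : Int → Int → Int) (V : PySem.Set (Int × Int)) :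
    pvFlood rows cols g [] V = (0, V) := by
  rw [pvFlood.eq_def]

theorem pvFlood_cons (rows cols : Int) (g : Int → Int → Int) (r c : Int)
    (rest : List (Int × Int)) (V : PySem.Set (Int × Int)) :
    pvFlood rows cols g ((r, c) :: rest) V =
      if r < 0 ∨ rows ≤ r ∨ c < 0 ∨ cols ≤ c ∨ PySem.Set.contains V (r, c) ∨ g r c = 1 then
        pvFlood rows cols g rest V
      else
        ((pvFlood rows cols g ((r - 1, c) :: (r + 1, c) :: (r, c - 1) :: (r, c + 1) :: rest)
            (PySem.Set.add V (r, c))).1 + 1,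
          (pvFlood rows cols g ((r - 1, c) :: (r + 1, c) :: (r, c - 1) :: (r, c + 1) :: rest)
            (PySem.Set.add V (r, c))).2) := by
  rw [pvFlood.eq_def]

theorem pvFlood_unvis_le (rows cols : Int) (g : Int → Int → Int) (s : List (Int × Int))
    (V : PySem.Set (Int × Int)) :
    pvUnvis rows cols (pvFlood rows cols g s V).2 ≤ pvUnvis rows cols V := by
  fun_induction pvFlood rows cols g s V with
  | case1 V => simp
  | case2 r c rest V h ih => exact ih
  | case3 r c rest V h ih =>
    exact le_trans ih (pvUnvis_add_le rows cols V (r, c))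

theorem pvFlood_append (rows cols : Int) (g : Int → Int → Int) (s1 s2 : List (Int × Int))
    (V : PySem.Set (Int × Int)) :
    pvFlood rows cols g (s1 ++ s2) V =
      ((pvFlood rows cols g s1 V).1 + (pvFlood rows cols g s2 (pvFlood rows cols g s1 V).2).1,
        (pvFlood rows cols g s2 (pvFlood rows cols g s1 V).2).2) := by
  fun_induction pvFlood rows cols g s1 V generalizing s2 with
  | case1 V => simp
  | case2 r c rest V h ih =>
    rw [List.cons_append, pvFlood_cons, if_pos h]
    exact ih s2
  | case3 r c rest V h ih =>
    rw [List.cons_append, pvFlood_cons, if_neg h]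
    have H := ih s2
    simp only [List.cons_append] at H
    rw [H]
    simp only [Prod.mk.injEq]
    exact ⟨by omega, by trivial⟩

theorem pvFlood_four (rows cols : Int) (g : Int → Int → Int) (x1 x2 x3 x4 : Int × Int)
    (V : PySem.Set (Int × Int)) :
    pvFlood rows cols g [x1, x2, x3, x4] V =
      ((pvFlood rows cols g [x1] V).1 +
        (pvFlood rows cols g [x2] (pvFlood rows cols g [x1] V).2).1 +
        (pvFlood rows cols g [x3] (pvFlood rows cols g [x2] (pvFlood rows cols g [x1] V).2).2).1 +
        (pvFlood rows cols g [x4] (pvFlood rows cols g [x3] (pvFlood rows cols g [x2] (pvFlood rows cols g [x1] V).2).2).2).1,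
        (pvFlood rows cols g [x4] (pvFlood rows cols g [x3] (pvFlood rows cols g [x2] (pvFlood rows cols g [x1] V).2).2).2).2) := by
  have a1 := pvFlood_append rows cols g [x1] [x2, x3, x4] V
  have a2 := pvFlood_append rows cols g [x2] [x3, x4] (pvFlood rows cols g [x1] V).2
  have a3 := pvFlood_append rows cols g [x3] [x4]
    (pvFlood rows cols g [x2] (pvFlood rows cols g [x1] V).2).2
  simp only [List.cons_append, List.nil_append] at a1 a2 a3
  rw [a1, a2, a3]
  simp only [Prod.mk.injEq]
  exact ⟨by omega, by trivial⟩

theorem pvBail_congr {rows cols r c : Int} {V : PySem.Set (Int × Int)} {g1 g2 : Int → Int → Int}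
    (hg : ∀ r c, 0 ≤ r → r < rows → 0 ≤ c → c < cols → g1 r c = g2 r c) :
    (r < 0 ∨ rows ≤ r ∨ c < 0 ∨ cols ≤ c ∨ PySem.Set.contains V (r, c) ∨ g1 r c = 1) ↔
      (r < 0 ∨ rows ≤ r ∨ c < 0 ∨ cols ≤ c ∨ PySem.Set.contains V (r, c) ∨ g2 r c = 1) := by
  by_cases hin : 0 ≤ r ∧ r < rows ∧ 0 ≤ c ∧ c < cols
  · rw [hg r c hin.1 hin.2.1 hin.2.2.1 hin.2.2.2]
  · have hb : r < 0 ∨ rows ≤ r ∨ c < 0 ∨ cols ≤ c := by omega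
    constructor <;> intro _ <;> tauto

theorem pvFlood_congr (rows cols : Int) (g1 g2 : Int → Int → Int)
    (hg : ∀ r c, 0 ≤ r → r < rows → 0 ≤ c → c < cols → g1 r c = g2 r c)
    (s : List (Int × Int)) (V : PySem.Set (Int × Int)) :
    pvFlood rows cols g1 s V = pvFlood rows cols g2 s V := by
  fun_induction pvFlood rows cols g1 s V with
  | case1 V => simp [pvFlood_nil]
  | case2 r c rest V h ih =>
    conv_rhs => rw [pvFlood_cons]
    rw [if_pos ((pvBail_congr hg).mp h)]
    exact ih
  | case3 r c rest V h ih =>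
    conv_rhs => rw [pvFlood_cons]
    rw [if_neg (fun hb => h ((pvBail_congr hg).mpr hb)), ← ih]

-- A's recursive DFS is the worklist semantics on a singleton stack
theorem pvDfsA_eq (area : List (List Int)) (fuel : Nat) :
    ∀ (r c : Int) (V : PySem.Set (Int × Int)),
      pvUnvis (area.length : Int) ((pvRow area 0).length : Int) V < fuel →
      pvDfsA area fuel r c V =
        pvFlood (area.length : Int) ((pvRow area 0).length : Int) (pvCell area) [(r, c)] V := by
  induction fuel with
  | zero => intro r c V h; omega
  | succ fuel ih =>
    intro r c V h
    rw [pvDfsA, pvFlood_cons]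
    by_cases hb : r < 0 ∨ ((area.length : Nat) : Int) ≤ r ∨ c < 0 ∨
        (((pvRow area 0).length : Nat) : Int) ≤ c ∨ PySem.Set.contains V (r, c) ∨ pvCell area r c = 1
    · rw [if_pos hb, if_pos hb, pvFlood_nil]
    · rw [if_neg hb, if_neg hb]
      push_neg at hb
      obtain ⟨h1, h2, h3, h4, h5, h6⟩ := hb
      have hV0lt : pvUnvis ((area.length : Nat) : Int) (((pvRow area 0).length : Nat) : Int)
          (PySem.Set.add V (r, c)) < fuel := by
        have hdec := pvUnvis_add_lt ((area.length : Nat) : Int) (((pvRow area 0).length : Nat) : Int)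
          V r c h1 (by omega) h3 (by omega) (by simpa using h5)
        omega
      have e1 := ih (r - 1) c (PySem.Set.add V (r, c)) hV0lt
      set P1 := pvFlood ((area.length : Nat) : Int) (((pvRow area 0).length : Nat) : Int)
        (pvCell area) [(r - 1, c)] (PySem.Set.add V (r, c)) with hP1
      have h1lt : pvUnvis ((area.length : Nat) : Int) (((pvRow area 0).length : Nat) : Int) P1.2 < fuel :=
        lt_of_le_of_lt (by rw [hP1]; exact pvFlood_unvis_le _ _ _ _ _) hV0lt
      have e2 := ih (r + 1) c P1.2 h1lt
      set P2 := pvFlood ((area.length : Nat) : Int) (((pvRow area 0).length : Nat) : Int)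
        (pvCell area) [(r + 1, c)] P1.2 with hP2
      have h2lt : pvUnvis ((area.length : Nat) : Int) (((pvRow area 0).length : Nat) : Int) P2.2 < fuel :=
        lt_of_le_of_lt (by rw [hP2]; exact pvFlood_unvis_le _ _ _ _ _) h1lt
      have e3 := ih r (c - 1) P2.2 h2lt
      set P3 := pvFlood ((area.length : Nat) : Int) (((pvRow area 0).length : Nat) : Int)
        (pvCell area) [(r, c - 1)] P2.2 with hP3
      have h3lt : pvUnvis ((area.length : Nat) : Int) (((pvRow area 0).length : Nat) : Int) P3.2 < fuel :=
        lt_of_le_of_lt (by rw [hP3]; exact pvFlood_unvis_le _ _ _ _ _) h2lt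
      have e4 := ih r (c + 1) P3.2 h3lt
      set P4 := pvFlood ((area.length : Nat) : Int) (((pvRow area 0).length : Nat) : Int)
        (pvCell area) [(r, c + 1)] P3.2 with hP4
      rw [pvFlood_four]
      rw [← hP1, ← hP2, ← hP3, ← hP4]
      simp only [e1, e2, e3, e4]
      simp only [Prod.mk.injEq]
      exact ⟨by omega, by trivial⟩

-- B's stack loop is the worklist semantics with an accumulating size counter
theorem pvFloodB_eq (area : List (List Int)) (fr fc : Int) (fuel : Nat) :
    ∀ (s : List (Int × Int)) (size : Int) (V : PySem.Set (Int × Int)),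
      s.length + 4 * pvUnvis (area.length : Int) ((pvRow area 0).length : Int) V < fuel →
      pvFloodB area fr fc fuel s size V =
        (size + (pvFlood (area.length : Int) ((pvRow area 0).length : Int) (pvVal area fr fc) s V).1,
          (pvFlood (area.length : Int) ((pvRow area 0).length : Int) (pvVal area fr fc) s V).2) := by
  induction fuel with
  | zero => intro s size V h; omega
  | succ fuel ih =>
    intro s size V h
    match s with
    | [] => simp [pvFloodB, pvFlood_nil]
    | (rr, cc) :: rest =>
      have hlen : rest.length + 1 + 4 * pvUnvis ((area.length : Nat) : Int)
          (((pvRow area 0).length : Nat) : Int) V < fuel + 1 := by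
        simpa using h
      rw [pvFloodB, pvFlood_cons]
      by_cases hbail : rr < 0 ∨ ((area.length : Nat) : Int) ≤ rr ∨ cc < 0 ∨
          (((pvRow area 0).length : Nat) : Int) ≤ cc ∨ PySem.Set.contains V (rr, cc) ∨
          pvVal area fr fc rr cc = 1
      · have hneg : ¬ (0 ≤ rr ∧ rr < ((area.length : Nat) : Int) ∧ 0 ≤ cc ∧
            cc < (((pvRow area 0).length : Nat) : Int) ∧ ¬ PySem.Set.contains V (rr, cc) ∧
            pvVal area fr fc rr cc ≠ 1) := by
          rintro ⟨a1, a2, a3, a4, a5, a6⟩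
          rcases hbail with hx | hx | hx | hx | hx | hx
          · omega
          · omega
          · omega
          · omega
          · exact a5 hx
          · exact a6 hx
        rw [if_neg hneg, if_pos hbail]
        exact ih rest size V (by omega)
      · push_neg at hbail
        obtain ⟨h1, h2, h3, h4, h5, h6⟩ := hbail
        rw [if_pos ⟨h1, h2, h3, h4, by simpa using h5, h6⟩,
          if_neg (by push_neg; exact ⟨h1, h2, h3, h4, h5, h6⟩)]
        have hdec := pvUnvis_add_lt ((area.length : Nat) : Int) (((pvRow area 0).length : Nat) : Int)
          V rr cc h1 h2 h3 h4 (by simpa using h5)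
        rw [ih _ _ _ (by simp only [List.length_cons]; omega)]
        simp only [Prod.mk.injEq]
        exact ⟨by omega, by trivial⟩

-- lengths are preserved by the flip mutation
theorem length_pvSetCell (area : List (List Int)) (r c v : Int) :
    (pvSetCell area r c v).length = area.length :=
  PySem.List.length_pySetD area r _

theorem row0_length_pvSetCell (area : List (List Int)) (fr fc v : Int)
    (hfr1 : 0 ≤ fr) (hfr2 : fr < (area.length : Int)) :
    (pvRow (pvSetCell area fr fc v) 0).length = (pvRow area 0).length := by
  have hfr : fr = ((fr.toNat : Nat) : Int) := by omega
  unfold pvRow pvSetCell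
  rw [hfr, show (0 : Int) = ((0 : Nat) : Int) from rfl,
    PySem.List.pyGetD_pySetD_natCast _ _ _ _ _ (by omega)]
  by_cases hz : (0 : Nat) = fr.toNat
  · rw [if_pos hz, PySem.List.length_pySetD]
    unfold pvRow
    rw [hfr, ← hz]
    simp
  · rw [if_neg hz]

-- the flipped grid read in bounds is exactly B's flip-aware accessor
theorem cell_agree (area : List (List Int))
    (hPre : ∀ row ∈ area, (pvRow area 0).length ≤ row.length)
    (fr fc : Int) (hfr1 : 0 ≤ fr) (hfr2 : fr < (area.length : Int))
    (hfc1 : 0 ≤ fc) (hfc2 : fc < ((pvRow area 0).length : Int))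
    (r c : Int) (hr1 : 0 ≤ r) (hr2 : r < (area.length : Int))
    (hc1 : 0 ≤ c) (hc2 : c < ((pvRow area 0).length : Int)) :
    pvCell (pvSetCell area fr fc 0) r c = pvVal area fr fc r c := by
  have hrow_len : (pvRow area 0).length ≤ (pvRow area fr).length := by
    refine hPre _ ?_
    unfold pvRow
    refine PySem.List.pyGetD_mem _ _ ?_
    simp only [PySem.Raise.InRange]
    omega
  have hfr' : fr = ((fr.toNat : Nat) : Int) := by omega
  have hr' : r = ((r.toNat : Nat) : Int) := by omega
  have hc' : c = ((c.toNat : Nat) : Int) := by omega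
  have hfc' : fc = ((fc.toNat : Nat) : Int) := by omega
  unfold pvVal pvCell pvSetCell pvRow
  unfold pvRow at hrow_len hfc2 hc2
  rw [hfr'] at hrow_len
  rw [hfr', hr', hc', hfc',
    PySem.List.pyGetD_pySetD_natCast _ _ _ _ _ (by omega)]
  by_cases hrfr : r.toNat = fr.toNat
  · rw [if_pos hrfr, PySem.List.pyGetD_pySetD_natCast _ _ _ _ _ (by omega)]
    by_cases hcfc : c.toNat = fc.toNat
    · rw [if_pos hcfc, if_pos ⟨by exact_mod_cast hrfr, by exact_mod_cast hcfc⟩]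
    · rw [if_neg hcfc, if_neg (by rintro ⟨-, hx⟩; exact hcfc (by exact_mod_cast hx)),
        show ((r.toNat : Nat) : Int) = ((fr.toNat : Nat) : Int) by exact_mod_cast hrfr]
  · rw [if_neg hrfr, if_neg (by rintro ⟨hx, -⟩; exact hrfr (by exact_mod_cast hx))]

-- pointwise equality of the two per-flip scans
theorem scan_eq (area : List (List Int))
    (hPre : ∀ row ∈ area, (pvRow area 0).length ≤ row.length)
    (fr fc : Int) (hfr1 : 0 ≤ fr) (hfr2 : fr < (area.length : Int))
    (hfc1 : 0 ≤ fc) (hfc2 : fc < ((pvRow area 0).length : Int)) :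
    ((PySem.List.pyRange 0 (area.length : Int) 1).foldl (fun st r =>
        (PySem.List.pyRange 0 ((pvRow area 0).length : Int) 1).foldl
          (fun (st : Int × PySem.Set (Int × Int)) c =>
            if pvCell (pvSetCell area fr fc 0) r c = 0 ∧ ¬ PySem.Set.contains st.2 (r, c) then
              let p := pvDfsA (pvSetCell area fr fc 0)
                (((area.length : Int)).toNat * (((pvRow area 0).length : Int)).toNat + 1) r c st.2
              (max st.1 p.1, p.2)
            else st) st) ((0 : Int), (PySem.Set.empty : PySem.Set (Int × Int)))) =
      ((PySem.List.pyRange 0 (area.length : Int) 1).foldl (fun st r =>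
        (PySem.List.pyRange 0 ((pvRow area 0).length : Int) 1).foldl
          (fun (st : Int × PySem.Set (Int × Int)) c =>
            if pvVal area fr fc r c = 0 ∧ ¬ PySem.Set.contains st.2 (r, c) then
              let q := pvFloodB area fr fc
                (4 * (((area.length : Int)).toNat * (((pvRow area 0).length : Int)).toNat) + 2)
                [(r, c)] 0 st.2
              (max st.1 q.1, q.2)
            else st) st) ((0 : Int), (PySem.Set.empty : PySem.Set (Int × Int)))) := by
  have hL : (pvSetCell area fr fc 0).length = area.length := length_pvSetCell area fr fc 0
  have hR : (pvRow (pvSetCell area fr fc 0) 0).length = (pvRow area 0).length :=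
    row0_length_pvSetCell area fr fc 0 hfr1 hfr2
  have hcellval : ∀ r c, 0 ≤ r → r < (area.length : Int) → 0 ≤ c → c < ((pvRow area 0).length : Int) →
      pvCell (pvSetCell area fr fc 0) r c = pvVal area fr fc r c := fun r c a1 a2 a3 a4 =>
    cell_agree area hPre fr fc hfr1 hfr2 hfc1 hfc2 r c a1 a2 a3 a4
  apply PySem.List.foldl_congr_mem
  intro st r hrmem
  have hr := (PySem.List.mem_pyRange_one).mp hrmem
  apply PySem.List.foldl_congr_mem
  intro st c hcmem
  have hc := (PySem.List.mem_pyRange_one).mp hcmem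
  have hcell := hcellval r c hr.1 hr.2 hc.1 hc.2
  by_cases hcond : pvVal area fr fc r c = 0 ∧ ¬ PySem.Set.contains st.2 (r, c)
  · rw [if_pos (by rw [hcell]; exact hcond), if_pos hcond]
    have hA : pvDfsA (pvSetCell area fr fc 0)
        (((area.length : Int)).toNat * (((pvRow area 0).length : Int)).toNat + 1) r c st.2 =
        pvFlood (area.length : Int) ((pvRow area 0).length : Int) (pvVal area fr fc) [(r, c)] st.2 := by
      have e := pvDfsA_eq (pvSetCell area fr fc 0)
        (((area.length : Int)).toNat * (((pvRow area 0).length : Int)).toNat + 1) r c st.2 (by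
          rw [hL, hR]
          have hle := pvUnvis_le ((area.length : Nat) : Int) (((pvRow area 0).length : Nat) : Int) st.2
          simp only [Int.toNat_natCast] at hle ⊢
          omega)
      rw [e, hL, hR]
      exact pvFlood_congr _ _ _ _ hcellval [(r, c)] st.2
    have hB : pvFloodB area fr fc
        (4 * (((area.length : Int)).toNat * (((pvRow area 0).length : Int)).toNat) + 2)
        [(r, c)] 0 st.2 =
        (0 + (pvFlood (area.length : Int) ((pvRow area 0).length : Int) (pvVal area fr fc) [(r, c)] st.2).1,
          (pvFlood (area.length : Int) ((pvRow area 0).length : Int) (pvVal area fr fc) [(r, c)] st.2).2) := by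
      apply pvFloodB_eq
      have hle := pvUnvis_le ((area.length : Nat) : Int) (((pvRow area 0).length : Nat) : Int) st.2
      simp only [Int.toNat_natCast] at hle ⊢
      simp only [List.length_cons, List.length_nil]
      omega
    rw [hA, hB]
    simp only [zero_add]
  · rw [if_neg (by rw [hcell]; exact hcond), if_neg hcond]

-- ===== VERDICT (by name: the statement is the Claim_ definition above) =====
theorem largest_land_mass_spec : Claim_equal_largest_land_mass := by
  intro area _ hPre
  obtain ⟨hne, hrows⟩ := hPre
  unfold Spec_largest_land_mass largest_land_mass largest_land_mass_alt
  apply PySem.List.foldl_congr_mem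
  intro best fr hfrmem
  have hfr := (PySem.List.mem_pyRange_one).mp hfrmem
  apply PySem.List.foldl_congr_mem
  intro best fc hfcmem
  have hfc := (PySem.List.mem_pyRange_one).mp hfcmem
  by_cases hflip : pvCell area fr fc = 1
  · rw [if_pos hflip, if_pos hflip]
    exact congrArg (fun z => max best z.1)
      (scan_eq area hrows fr fc hfr.1 hfr.2 hfc.1 hfc.2)
  · rw [if_neg hflip, if_neg hflip]
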